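-- pv_equiv track=rewrite | github.com/kh277/BOJ | 백준/Silver/33756. 88888/88888.py | solve
-- ===== SOURCE A (Python) =====
-- def solve(N):
--     eight = [8]
--     for i in range(17):
--         eight.append(int(str(eight[i]) + '8'))
--
--     cur = len(eight)-1
--     count = 0
--     while N > 0 and cur >= 0:
--         if count > 8:
--             break
--
--         if N < eight[cur]:
--             cur -= 1
--             continue
--
--         N -= eight[cur]
--         count += 1
--
--     return 'Yes' if count <= 8 and N == 0 else 'No'
-- ===== SOURCE B (Python) =====
-- def solve(N):
--     if N < 0:
--         return 'No'
--     vals = []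
--     v = 8
--     for _ in range(18):
--         vals.append(v)
--         v = v * 10 + 8
--     count = 0
--     for w in reversed(vals):
--         count += N // w
--         N %= w
--     return 'Yes' if count <= 8 and N == 0 else 'No'
-- ===== Notes on version B (the rewrite author's own statement) =====
-- stated objective: simpler
-- what changed: Replaces A's pointer-walk with repeated subtraction, continue/break control flow and a string-built table by a single divmod pass over the descending repeated-8 values generated arithmetically (count += N//v; N %= v), with an explicit guard for negative N.
import Mathlib
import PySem

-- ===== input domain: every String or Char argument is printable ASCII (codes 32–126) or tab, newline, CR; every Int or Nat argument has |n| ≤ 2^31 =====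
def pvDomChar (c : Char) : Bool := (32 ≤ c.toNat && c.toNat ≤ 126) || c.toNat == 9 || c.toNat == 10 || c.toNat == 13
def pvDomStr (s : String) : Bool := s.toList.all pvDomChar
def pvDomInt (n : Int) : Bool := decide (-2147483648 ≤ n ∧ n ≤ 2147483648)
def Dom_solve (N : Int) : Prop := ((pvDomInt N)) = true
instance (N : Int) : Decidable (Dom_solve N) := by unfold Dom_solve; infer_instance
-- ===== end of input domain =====

-- B replaces A's pointer-and-repeated-subtraction greedy over a prebuilt list by one divmod
-- pass over the descending values (objective: simpler; same exact verdict).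

-- ===== PORT A =====
-- eight = [8]; for i in range(17): eight.append(int(str(eight[i]) + '8'))
-- (the '.getD 0' covers int()'s ValueError branch, which never fires: the string is always digits)
def eightA : List Int :=
  (PySem.List.pyRange 0 17 1).foldl
    (fun acc i => acc ++ [(PySem.Int.ofStr? (PySem.Int.toStr (PySem.List.pyGetD acc i 0) ++ "8")).getD 0])
    [8]

-- every value in the table is positive (used by loopA's termination proof)
theorem eightA_mem_pos : ∀ x ∈ eightA, (0:Int) < x := by decide

-- the while loop: state (N, cur, count); returns final (count, N)
def loopA (N cur count : Int) : Int × Int :=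
  if 0 < N ∧ 0 ≤ cur then
    if 8 < count then (count, N)
    else
      match h : PySem.List.pyGet? eightA cur with
      | none => (count, N)   -- IndexError; unreachable (0 ≤ cur ≤ 17 throughout)
      | some e =>
        if N < e then loopA N (cur - 1) count
        else loopA (N - e) cur (count + 1)
  else (count, N)
termination_by (N.toNat, (cur + 1).toNat)
decreasing_by
  · apply Prod.Lex.right' <;> omega
  · apply Prod.Lex.left
    have := eightA_mem_pos e (PySem.List.mem_of_pyGet?_eq_some eightA h)
    omega

def solve (N : Int) : String :=
  let cur : Int := (eightA.length : Int) - 1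
  let r := loopA N cur 0
  if r.1 ≤ 8 ∧ r.2 = 0 then "Yes" else "No"

-- ===== PORT B =====
def solve_alt (N : Int) : String :=
  if N < 0 then "No"
  else
    let p := (PySem.List.pyRange 0 18 1).foldl
      (fun (p : List Int × Int) _ => (p.1 ++ [p.2], p.2 * 10 + 8)) ([], 8)
    let q := p.1.reverse.foldl
      (fun (q : Int × Int) w => (q.1 + PySem.Int.floordiv q.2 w, PySem.Int.mod q.2 w)) (0, N)
    if q.1 ≤ 8 ∧ q.2 = 0 then "Yes" else "No"

-- ===== PRECONDITION & SPEC =====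
def Spec_solve (N : Int) (out : String) : Prop := out = solve_alt N
instance (N : Int) (out : String) : Decidable (Spec_solve N out) := by unfold Spec_solve; infer_instance

-- ===== CLAIM (what is proved, stated in full; the proofs are below) =====
def Claim_equal_solve : Prop := ∀ (N : Int), Dom_solve N → Spec_solve N (solve N)

-- ===== LEMMAS AND PROOFS =====

-- the table's literal value
def V : List Int :=
  [8, 88, 888, 8888, 88888, 888888, 8888888, 88888888, 888888888, 8888888888,
   88888888888, 888888888888, 8888888888888, 88888888888888, 888888888888888,
   8888888888888888, 88888888888888888, 888888888888888888]

theorem eightA_eq : eightA = V := by decide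

theorem V_pos : ∀ x ∈ V, (0:Int) < x := by decide

-- B's divmod pass, abstracted over the value list; state (count, N)
def gB (vs : List Int) (c N : Int) : Int × Int :=
  vs.foldl (fun q w => (q.1 + PySem.Int.floordiv q.2 w, PySem.Int.mod q.2 w)) (c, N)

-- the descending tail of values A still has to visit from index cur
def descI (cur : Int) : List Int := (V.take (cur + 1).toNat).reverse

theorem descI_pos (cur : Int) : ∀ w ∈ descI cur, (0:Int) < w := by
  intro w hw
  simp only [descI, List.mem_reverse] at hw
  exact V_pos w (List.mem_of_mem_take hw)

theorem gB_cons (w : Int) (vs : List Int) (c N : Int) :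
    gB (w :: vs) c N = gB vs (c + PySem.Int.floordiv N w) (PySem.Int.mod N w) := rfl

theorem gB_zero : ∀ (vs : List Int), (∀ w ∈ vs, (0:Int) < w) → ∀ c, gB vs c 0 = (c, 0) := by
  intro vs
  induction vs with
  | nil => intro _ c; rfl
  | cons w vs ih =>
    intro hpos c
    have hw : (0:Int) < w := hpos w (by simp)
    rw [gB_cons, PySem.Int.floordiv_eq_ediv_of_pos hw, PySem.Int.mod_eq_emod_of_pos hw]
    simp [ih (fun x hx => hpos x (by simp [hx]))]

theorem gB_count_ge : ∀ (vs : List Int), (∀ w ∈ vs, (0:Int) < w) →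
    ∀ c N, 0 ≤ N → c ≤ (gB vs c N).1 := by
  intro vs
  induction vs with
  | nil => intro _ c N _; exact le_refl _
  | cons w vs ih =>
    intro hpos c N hN
    have hw : (0:Int) < w := hpos w (by simp)
    rw [gB_cons, PySem.Int.floordiv_eq_ediv_of_pos hw, PySem.Int.mod_eq_emod_of_pos hw]
    have h1 : c ≤ c + N / w := by
      have := Int.ediv_nonneg hN (le_of_lt hw); omega
    have h2 : 0 ≤ N % w := Int.emod_nonneg N (by omega)
    exact le_trans h1 (ih (fun x hx => hpos x (by simp [hx])) _ _ h2)

theorem descI_neg (cur : Int) (h : cur < 0) : descI cur = [] := by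
  unfold descI
  have : (cur + 1).toNat = 0 := by omega
  simp [this]

theorem descI_cons (cur : Int) (e : Int) (h0 : 0 ≤ cur)
    (h : PySem.List.pyGet? eightA cur = some e) :
    descI cur = e :: descI (cur - 1) := by
  rw [eightA_eq] at h
  rw [PySem.List.pyGet?_of_nonneg V h0] at h
  have hlt : cur.toNat < V.length := by
    by_contra hge
    simp [List.getElem?_eq_none (by omega : V.length ≤ cur.toNat)] at h
  have he : V[cur.toNat] = e := by
    simpa [List.getElem?_eq_getElem hlt] using h
  unfold descI
  have h1 : (cur + 1).toNat = cur.toNat + 1 := by omega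
  have h2 : (cur - 1 + 1).toNat = cur.toNat := by omega
  rw [h1, h2, List.take_add_one, List.getElem?_eq_getElem hlt, he]
  simp

-- main invariant: A's loop and B's divmod pass give the same Yes/No verdict
theorem loopA_gB : ∀ (N cur count : Int), cur ≤ 17 → 0 ≤ N →
    (((loopA N cur count).1 ≤ 8 ∧ (loopA N cur count).2 = 0) ↔
     ((gB (descI cur) count N).1 ≤ 8 ∧ (gB (descI cur) count N).2 = 0)) := by
  intro N cur count
  induction N, cur, count using loopA.induct with
  | case1 N cur count hg hc =>
    -- 0 < N, 0 ≤ cur, 8 < count : break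
    intro _ hN
    rw [loopA.eq_def]
    rw [if_pos hg, if_pos hc]
    constructor
    · rintro ⟨h1, _⟩; omega
    · rintro ⟨h1, _⟩
      have := gB_count_ge (descI cur) (descI_pos cur) count N hN
      omega
  | case2 N cur count hg hc h =>
    -- pyGet? = none is unreachable: 0 ≤ cur ≤ 17 is always in range
    intro hcur hN
    exfalso
    rw [eightA_eq, PySem.List.pyGet?_of_nonneg V hg.2] at h
    have hlt : cur.toNat < V.length := by
      have : cur.toNat ≤ 17 := by omega
      simp only [V, List.length]
      omega
    rw [List.getElem?_eq_getElem hlt] at h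
    cases h
  | case3 N cur count hg hc e h hlt ih =>
    intro hcur hN
    rw [loopA.eq_def]
    rw [if_pos hg, if_neg hc]
    split
    case _ heq => rw [h] at heq; cases heq
    case _ e' heq =>
    rw [h] at heq
    injection heq with he'
    subst he'
    rw [if_pos hlt]
    rw [descI_cons cur e hg.2 h, gB_cons]
    have he : (0:Int) < e := V_pos e (by rw [← eightA_eq]; exact PySem.List.mem_of_pyGet?_eq_some eightA h)
    rw [PySem.Int.floordiv_eq_ediv_of_pos he, PySem.Int.mod_eq_emod_of_pos he]
    have hd : N / e = 0 := Int.ediv_eq_zero_of_lt hN hlt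
    have hm : N % e = N := Int.emod_eq_of_lt hN hlt
    rw [hd, hm, add_zero]
    exact ih (by omega) hN
  | case4 N cur count hg hc e h hge ih =>
    intro hcur hN
    rw [loopA.eq_def]
    rw [if_pos hg, if_neg hc]
    split
    case _ heq => rw [h] at heq; cases heq
    case _ e' heq =>
    rw [h] at heq
    injection heq with he'
    subst he'
    rw [if_neg hge]
    have he : (0:Int) < e := V_pos e (by rw [← eightA_eq]; exact PySem.List.mem_of_pyGet?_eq_some eightA h)
    have step := ih hcur (by omega : (0:Int) ≤ N - e)
    rw [descI_cons cur e hg.2 h, gB_cons] at step ⊢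
    have hfd : PySem.Int.floordiv N e = PySem.Int.floordiv (N - e) e + 1 := by
      rw [PySem.Int.floordiv_eq_ediv_of_pos he, PySem.Int.floordiv_eq_ediv_of_pos he]
      have h1 : (N + (-1) * e) / e = N / e + (-1) := Int.add_mul_ediv_right N (-1) (by omega)
      have h2 : N + (-1) * e = N - e := by ring
      rw [h2] at h1
      omega
    have hmd : PySem.Int.mod N e = PySem.Int.mod (N - e) e := by
      rw [PySem.Int.mod_eq_emod_of_pos he, PySem.Int.mod_eq_emod_of_pos he]
      rw [Int.sub_emod, Int.emod_self, sub_zero, Int.emod_emod_of_dvd _ dvd_rfl]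
    rw [hfd, hmd]
    have hcc : count + (PySem.Int.floordiv (N - e) e + 1) = count + 1 + PySem.Int.floordiv (N - e) e := by ring
    rw [hcc]
    exact step
  | case5 N cur count hng =>
    intro _ hN
    rw [loopA.eq_def]
    rw [if_neg hng]
    by_cases hc : cur < 0
    · rw [descI_neg cur hc]; exact Iff.rfl
    · have hN0 : N = 0 := by
        rcases not_and_or.mp hng with h | h
        · omega
        · omega
      subst hN0
      rw [gB_zero (descI cur) (descI_pos cur) count]

theorem descI_17 : descI 17 = V.reverse := by decide

theorem valsB_eq :
    ((PySem.List.pyRange 0 18 1).foldl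
      (fun (p : List Int × Int) _ => (p.1 ++ [p.2], p.2 * 10 + 8)) ([], 8)).1 = V := by decide

-- ===== VERDICT (by name: the statement is the Claim_ definition above) =====
theorem solve_spec : Claim_equal_solve := by
  intro N _
  have hlen : ((eightA.length : Int) - 1) = 17 := by rw [eightA_eq]; rfl
  simp only [Spec_solve, solve, solve_alt, hlen, valsB_eq]
  by_cases hN : N < 0
  · have hA : loopA N 17 0 = (0, N) := by
      rw [loopA.eq_def]; rw [if_neg (by omega)]
    rw [hA, if_pos hN, if_neg (by rintro ⟨_, h2⟩; omega)]
  · rw [if_neg hN]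
    have h := loopA_gB N 17 0 (by omega) (by omega)
    rw [descI_17] at h
    simp only [gB] at h
    exact if_congr h rfl rfl
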